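-- pv_equiv track=rewrite | github.com/Attyuttam/cp-practice | TLE eliminators/Div 800/everybody_likes_good_arrays.py | solution
-- ===== SOURCE A (Python) =====
-- def solution(n,arr):
--     num = 0
--     even = arr[0]%2==0
--     count = 1
--     for i in range(1,n):
--         if arr[i]%2==0 and even:
--             count+=1
--         elif arr[i]%2!=0 and not even:
--             count+=1
--         else:
--             num+=(count-1)
--             count = 1
--             even = arr[i]%2==0
--     if count > 1:
--         num+=count-1
--     return num
-- ===== SOURCE B (Python) =====
-- def solution(n, arr):
--     prev = arr[0] % 2
--     num = 0
--     for i in range(1, n):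
--         cur = arr[i] % 2
--         if cur == prev:
--             num += 1
--         prev = cur
--     return num
-- ===== Notes on version B (the rewrite author's own statement) =====
-- stated objective: simpler
-- what changed: B counts adjacent same-parity pairs directly with a single previous-parity variable, removing A's run-length accumulator and the end-of-run/final 'count-1' emissions.
import Mathlib
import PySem

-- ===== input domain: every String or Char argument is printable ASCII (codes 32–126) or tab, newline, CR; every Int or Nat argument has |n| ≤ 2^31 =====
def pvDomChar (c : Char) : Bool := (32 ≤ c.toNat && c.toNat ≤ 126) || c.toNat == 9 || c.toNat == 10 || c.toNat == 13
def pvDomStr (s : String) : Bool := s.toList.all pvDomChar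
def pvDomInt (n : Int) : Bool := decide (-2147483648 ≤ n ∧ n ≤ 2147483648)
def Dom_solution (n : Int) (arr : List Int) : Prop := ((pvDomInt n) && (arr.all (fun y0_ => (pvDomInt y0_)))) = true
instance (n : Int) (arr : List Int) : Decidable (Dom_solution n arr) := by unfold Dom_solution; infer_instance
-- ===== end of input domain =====

-- B replaces A's run-length bookkeeping by a direct count of adjacent same-parity pairs (simpler decomposition, same O(n) cost).

-- ===== PORT A =====
-- loop body of A, step for step: the two 'count += 1' branches, then the run-emission branch
def stepA (arr : List Int) (st : Int × Bool × Int) (i : Int) : Int × Bool × Int :=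
  if PySem.Int.mod (PySem.List.pyGetD arr i 0) 2 == 0 && st.2.1 then
    (st.1, st.2.1, st.2.2 + 1)
  else if PySem.Int.mod (PySem.List.pyGetD arr i 0) 2 != 0 && !st.2.1 then
    (st.1, st.2.1, st.2.2 + 1)
  else
    (st.1 + (st.2.2 - 1), PySem.Int.mod (PySem.List.pyGetD arr i 0) 2 == 0, 1)

-- A's final 'if count > 1: num += count-1'
def finA (st : Int × Bool × Int) : Int :=
  if st.2.2 > 1 then st.1 + (st.2.2 - 1) else st.1

def solution (n : Int) (arr : List Int) : Int :=
  finA ((PySem.List.pyRange 1 n 1).foldl (stepA arr)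
    (0, (PySem.Int.mod (PySem.List.pyGetD arr 0 0) 2 == 0 : Bool), 1))

-- ===== PORT B =====
-- loop body of B: cur = arr[i] % 2; num += 1 if cur == prev; prev = cur
def stepB (arr : List Int) (st : Int × Int) (i : Int) : Int × Int :=
  let cur := PySem.Int.mod (PySem.List.pyGetD arr i 0) 2
  ((if cur == st.2 then st.1 + 1 else st.1), cur)

def solution_alt (n : Int) (arr : List Int) : Int :=
  ((PySem.List.pyRange 1 n 1).foldl (stepB arr)
    ((0 : Int), PySem.Int.mod (PySem.List.pyGetD arr 0 0) 2)).1

-- ===== PRECONDITION & SPEC =====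
-- Pre_ excludes exactly the inputs where Python A raises IndexError: an empty arr (arr[0]),
-- or n exceeding len(arr) (arr[i] for some i in range(1, n)).
def Pre_solution (n : Int) (arr : List Int) : Prop := arr ≠ [] ∧ n ≤ (arr.length : Int)
instance (n : Int) (arr : List Int) : Decidable (Pre_solution n arr) := by unfold Pre_solution; infer_instance
def pvWitness_solution : Int × List Int := (4, [1, 3, 2, 2])
def Spec_solution (n : Int) (arr : List Int) (out : Int) : Prop := out = solution_alt n arr
instance (n : Int) (arr : List Int) (out : Int) : Decidable (Spec_solution n arr out) := by unfold Spec_solution; infer_instance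

-- ===== CLAIM (what is proved, stated in full; the proofs are below) =====
def Claim_equal_solution : Prop := ∀ (n : Int) (arr : List Int), Dom_solution n arr → Pre_solution n arr → Spec_solution n arr (solution n arr)

-- ===== LEMMAS AND PROOFS =====

-- same parity as the stored prev: A extends the current run, B counts the pair
theorem stepA_same (arr : List Int) (i num count prev : Int)
    (hp : prev = 0 ∨ prev = 1) (h : PySem.Int.mod (PySem.List.pyGetD arr i 0) 2 = prev) :
    stepA arr (num, (prev == 0 : Bool), count) i = (num, (prev == 0 : Bool), count + 1) := by
  have h' : PySem.List.pyGetD arr i 0 % 2 = prev := by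
    rw [← PySem.Int.mod_eq_emod_of_pos (by omega : (0:Int) < 2)]; exact h
  rcases hp with hp | hp <;> subst hp <;> simp [stepA, h']

theorem stepB_same (arr : List Int) (i numB prev : Int)
    (h : PySem.Int.mod (PySem.List.pyGetD arr i 0) 2 = prev) :
    stepB arr (numB, prev) i = (numB + 1, prev) := by
  have h' : PySem.List.pyGetD arr i 0 % 2 = prev := by
    rw [← PySem.Int.mod_eq_emod_of_pos (by omega : (0:Int) < 2)]; exact h
  simp [stepB, h']

-- parity differs from the stored prev: A emits the run and restarts, B just moves prev
theorem stepA_diff (arr : List Int) (i num count prev : Int)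
    (hp : prev = 0 ∨ prev = 1) (h : PySem.Int.mod (PySem.List.pyGetD arr i 0) 2 ≠ prev) :
    stepA arr (num, (prev == 0 : Bool), count) i =
      (num + (count - 1), (PySem.Int.mod (PySem.List.pyGetD arr i 0) 2 == 0 : Bool), 1) := by
  have h2 : PySem.List.pyGetD arr i 0 % 2 = PySem.Int.mod (PySem.List.pyGetD arr i 0) 2 :=
    (PySem.Int.mod_eq_emod_of_pos (by omega : (0:Int) < 2)).symm
  rcases hp with hp | hp <;> subst hp <;>
    rcases PySem.Int.mod_two_eq (PySem.List.pyGetD arr i 0) with hx | hx <;>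
    rw [hx] at h2 ⊢ <;> first
      | exact absurd hx h
      | simp [stepA, h2]

theorem stepB_diff (arr : List Int) (i numB prev : Int)
    (h : PySem.Int.mod (PySem.List.pyGetD arr i 0) 2 ≠ prev) :
    stepB arr (numB, prev) i = (numB, PySem.Int.mod (PySem.List.pyGetD arr i 0) 2) := by
  have h' : ¬ PySem.List.pyGetD arr i 0 % 2 = prev := by
    rw [← PySem.Int.mod_eq_emod_of_pos (by omega : (0:Int) < 2)]; exact h
  simp [stepB, h']

-- loop invariant: count ≥ 1, prev ∈ {0,1}, even = (prev == 0), num + count - 1 = numB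
theorem loop_rel (arr : List Int) (l : List Int) :
    ∀ (num count prev numB : Int), 1 ≤ count → (prev = 0 ∨ prev = 1) →
      num + count - 1 = numB →
      finA (l.foldl (stepA arr) (num, (prev == 0 : Bool), count)) =
      (l.foldl (stepB arr) (numB, prev)).1 := by
  induction l with
  | nil =>
    intro num count prev numB hc _ hn
    simp only [List.foldl_nil, finA]
    split_ifs with h <;> omega
  | cons i l ih =>
    intro num count prev numB hc hp hn
    rw [List.foldl_cons, List.foldl_cons]
    by_cases h : PySem.Int.mod (PySem.List.pyGetD arr i 0) 2 = prev
    · rw [stepA_same arr i num count prev hp h, stepB_same arr i numB prev h]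
      exact ih num (count + 1) prev (numB + 1) (by omega) hp (by omega)
    · rw [stepA_diff arr i num count prev hp h, stepB_diff arr i numB prev h]
      exact ih (num + (count - 1)) 1 _ numB (by omega)
        (PySem.Int.mod_two_eq _) (by omega)

-- ===== VERDICT (by name: the statement is the Claim_ definition above) =====
theorem solution_spec : Claim_equal_solution := by
  intro n arr _ _
  unfold Spec_solution solution solution_alt
  exact loop_rel arr (PySem.List.pyRange 1 n 1) 0 1
    (PySem.Int.mod (PySem.List.pyGetD arr 0 0) 2) 0 (by omega)
    (PySem.Int.mod_two_eq _) (by omega)
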